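-- pv_equiv track=rewrite | github.com/Pendigard/Paris-Real-Estate-Data | Célian/analysis/utils.py | get_periode
-- ===== SOURCE A (Python) =====
-- def get_periode(annee):
--     ref = {1946 : '1946-1970',
--         1971 : '1971-1990',
--         1990 : 'Apres 1990'}
--     periode = 'Avant 1946'
--     for annee_ref in ref.keys():
--         if annee < annee_ref:
--             break
--         periode = ref[annee_ref]
--     return periode
-- ===== SOURCE B (Python) =====
-- def _bisect_right(xs, x):
--     lo, hi = 0, len(xs)
--     while lo < hi:
--         mid = (lo + hi) // 2
--         if x < xs[mid]:
--             hi = mid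
--         else:
--             lo = mid + 1
--     return lo
--
-- def get_periode(annee):
--     thresholds = [1946, 1971, 1990]
--     labels = ['Avant 1946', '1946-1970', '1971-1990', 'Apres 1990']
--     return labels[_bisect_right(thresholds, annee)]
-- ===== Notes on version B (the rewrite author's own statement) =====
-- stated objective: idiomatic
-- what changed: Replaced the accumulate-and-break linear scan over a dict's keys with a binary search (bisect_right, hand-written since A imports nothing) into a sorted threshold table indexing a parallel label list.
import Mathlib
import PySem

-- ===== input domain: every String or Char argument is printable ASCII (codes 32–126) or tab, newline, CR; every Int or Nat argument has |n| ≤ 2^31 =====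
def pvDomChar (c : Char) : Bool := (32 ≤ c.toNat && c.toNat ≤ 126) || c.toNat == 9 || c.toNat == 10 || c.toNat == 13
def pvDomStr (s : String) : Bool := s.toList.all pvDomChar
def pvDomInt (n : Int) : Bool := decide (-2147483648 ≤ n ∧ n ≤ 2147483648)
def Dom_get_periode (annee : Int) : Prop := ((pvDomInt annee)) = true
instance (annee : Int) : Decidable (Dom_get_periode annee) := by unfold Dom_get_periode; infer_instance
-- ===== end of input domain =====

-- B replaces A's linear scan with a break over a dict by bisect_right into a
-- sorted threshold table indexing a parallel label list; same values everywhere.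

-- ===== PORT A =====
-- the dict literal of A, as an association list in insertion order
def getPeriodeRef : PySem.Dict Int String :=
  PySem.Dict.ofList [((1946 : Int), "1946-1970"), (1971, "1971-1990"), (1990, "Apres 1990")]

-- the for-loop over ref.keys() with break; `periode` is the accumulator
def getPeriodeLoop (annee : Int) : List Int → String → String
  | [], periode => periode
  | annee_ref :: ks, periode =>
    if annee < annee_ref then periode
    else getPeriodeLoop annee ks ((getPeriodeRef.get? annee_ref).getD "")

def get_periode (annee : Int) : String :=
  getPeriodeLoop annee (getPeriodeRef.keys) "Avant 1946"

-- ===== PORT B =====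
-- hand-written bisect_right from Source B, as a lo/hi binary search (fuel = hi - lo)
def bisectRightGo (xs : List Int) (x : Int) : Nat → Nat → Nat → Nat
  | 0, lo, _ => lo
  | fuel + 1, lo, hi =>
    if lo < hi then
      let mid := (lo + hi) / 2
      if x < (PySem.List.pyGet? xs (mid : Int)).getD 0 then
        bisectRightGo xs x fuel lo mid
      else
        bisectRightGo xs x fuel (mid + 1) hi
    else lo

def bisectRight (xs : List Int) (x : Int) : Nat :=
  bisectRightGo xs x xs.length 0 xs.length

def get_periode_alt (annee : Int) : String :=
  let thresholds : List Int := [1946, 1971, 1990]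
  let labels := ["Avant 1946", "1946-1970", "1971-1990", "Apres 1990"]
  (PySem.List.pyGet? labels ((bisectRight thresholds annee : Nat) : Int)).getD ""

-- ===== PRECONDITION & SPEC =====
def Spec_get_periode (annee : Int) (out : String) : Prop := out = get_periode_alt annee
instance (annee : Int) (out : String) : Decidable (Spec_get_periode annee out) := by unfold Spec_get_periode; infer_instance

-- ===== CLAIM (what is proved, stated in full; the proofs are below) =====
def Claim_equal_get_periode : Prop := ∀ (annee : Int), Dom_get_periode annee → Spec_get_periode annee (get_periode annee)

-- ===== LEMMAS AND PROOFS =====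
theorem get_periode_eq_alt (annee : Int) : get_periode annee = get_periode_alt annee := by
  have href : getPeriodeRef =
      PySem.Dict.mk [((1946 : Int), "1946-1970"), (1971, "1971-1990"), (1990, "Apres 1990")] := by
    decide
  unfold get_periode get_periode_alt bisectRight bisectRightGo
  by_cases h1 : annee < 1946
  · have h2 : annee < 1971 := by omega
    simp [href, getPeriodeLoop, PySem.Dict.keys_mk, bisectRightGo, PySem.List.pyGet?, PySem.List.pyIdx?, h1, h2]
  · by_cases h2 : annee < 1971
    · simp [href, getPeriodeLoop, PySem.Dict.keys_mk, PySem.Dict.get?_mk_cons, bisectRightGo, PySem.List.pyGet?, PySem.List.pyIdx?, h1, h2]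
    · by_cases h3 : annee < 1990
      · simp [href, getPeriodeLoop, PySem.Dict.keys_mk, PySem.Dict.get?_mk_cons, bisectRightGo, PySem.List.pyGet?, PySem.List.pyIdx?, h1, h2, h3]
      · simp [href, getPeriodeLoop, PySem.Dict.keys_mk, PySem.Dict.get?_mk_cons, bisectRightGo, PySem.List.pyGet?, PySem.List.pyIdx?, h1, h2, h3]

-- ===== VERDICT (by name: the statement is the Claim_ definition above) =====
theorem get_periode_spec : Claim_equal_get_periode := by
  intro annee _
  unfold Spec_get_periode
  exact get_periode_eq_alt annee
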